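-- pv_equiv track=rewrite | github.com/sakettamrakar/TraderFund | src/dashboard/backend/loaders/strategies.py | _get_family_status_from_resolution
-- ===== SOURCE A (Python) =====
-- from typing import Dict, Any, List, Optional
--
-- def _get_family_status_from_resolution(resolution: Dict[str, Any], family_id: str) -> str:
--     strategies = resolution.get("strategies", [])
--     family_strats = [s for s in strategies if s.get("family") == family_id]
--     if not family_strats:
--         return "UNKNOWN"
--
--     has_eligible = any(s.get("eligibility_status") == "ELIGIBLE" for s in family_strats)
--     if has_eligible:
--         return "ELIGIBLE"
--
--     has_conditional = any(s.get("eligibility_status") == "CONDITIONAL" for s in family_strats)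
--     if has_conditional:
--         return "CONDITIONAL"
--
--     return "GATED"
-- ===== SOURCE B (Python) =====
-- def _get_family_status_from_resolution(resolution, family_id):
--     # Single-pass max-reduction: encode each matching strategy's status as a
--     # numeric rank and keep the running maximum; decode the final rank.
--     rank = 0
--     for s in resolution.get("strategies", []):
--         if s.get("family") == family_id:
--             st = s.get("eligibility_status")
--             r = 3 if st == "ELIGIBLE" else 2 if st == "CONDITIONAL" else 1
--             if r > rank:
--                 rank = r
--     if rank == 3:
--         return "ELIGIBLE"
--     if rank == 2:
--         return "CONDITIONAL"
--     if rank == 1: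
--         return "GATED"
--     return "UNKNOWN"
-- ===== Notes on version B (the rewrite author's own statement) =====
-- stated objective: alternative
-- what changed: B replaces A's filter pass plus two priority any-scans with a single-pass numeric max-reduction: each matching strategy is mapped to a rank (ELIGIBLE=3, CONDITIONAL=2, other=1, no match=0), the running maximum is kept, and the final rank is decoded to the status; correct because the priority order is exactly the numeric order of ranks.
import Mathlib
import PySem

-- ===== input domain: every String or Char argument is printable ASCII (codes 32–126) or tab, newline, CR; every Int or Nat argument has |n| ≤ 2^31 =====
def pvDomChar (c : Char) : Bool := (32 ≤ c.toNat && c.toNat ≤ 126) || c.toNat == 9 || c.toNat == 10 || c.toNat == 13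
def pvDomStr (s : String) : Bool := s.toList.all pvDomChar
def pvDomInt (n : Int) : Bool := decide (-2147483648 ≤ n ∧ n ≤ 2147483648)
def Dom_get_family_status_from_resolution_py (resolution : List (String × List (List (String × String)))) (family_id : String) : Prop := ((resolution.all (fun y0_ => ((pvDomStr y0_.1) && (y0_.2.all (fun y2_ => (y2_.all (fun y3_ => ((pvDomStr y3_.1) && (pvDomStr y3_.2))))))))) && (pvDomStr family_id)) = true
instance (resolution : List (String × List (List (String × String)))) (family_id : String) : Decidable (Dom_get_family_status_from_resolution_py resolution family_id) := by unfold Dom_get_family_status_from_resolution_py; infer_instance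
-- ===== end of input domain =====

-- B replaces A's filter pass plus two priority any-scans with a single-pass numeric
-- max-rank reduction (ELIGIBLE=3, CONDITIONAL=2, other match=1, none=0) decoded at the end
-- (objective: alternative).

-- ===== PORT A =====
def get_family_status_from_resolution_py (resolution : List (String × List (List (String × String)))) (family_id : String) : String :=
  let strategies := PySem.Dict.getD (PySem.Dict.mk resolution) "strategies" []
  let family_strats := strategies.filter
    (fun s => PySem.Dict.get? (PySem.Dict.mk s) "family" == some family_id)
  if family_strats = [] then "UNKNOWN"
  else if family_strats.any
      (fun s => PySem.Dict.get? (PySem.Dict.mk s) "eligibility_status" == some "ELIGIBLE") then "ELIGIBLE"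
  else if family_strats.any
      (fun s => PySem.Dict.get? (PySem.Dict.mk s) "eligibility_status" == some "CONDITIONAL") then "CONDITIONAL"
  else "GATED"

-- ===== PORT B =====
def get_family_status_from_resolution_py_alt (resolution : List (String × List (List (String × String)))) (family_id : String) : String :=
  let rank := (PySem.Dict.getD (PySem.Dict.mk resolution) "strategies" []).foldl
    (fun rank s =>
      if PySem.Dict.get? (PySem.Dict.mk s) "family" == some family_id then
        let st := PySem.Dict.get? (PySem.Dict.mk s) "eligibility_status"
        let r : Nat := if st == some "ELIGIBLE" then 3 else if st == some "CONDITIONAL" then 2 else 1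
        if r > rank then r else rank
      else rank) 0
  if rank = 3 then "ELIGIBLE"
  else if rank = 2 then "CONDITIONAL"
  else if rank = 1 then "GATED"
  else "UNKNOWN"

-- ===== PRECONDITION & SPEC =====
def Spec_get_family_status_from_resolution_py (resolution : List (String × List (List (String × String)))) (family_id : String) (out : String) : Prop := out = get_family_status_from_resolution_py_alt resolution family_id
instance (resolution : List (String × List (List (String × String)))) (family_id : String) (out : String) : Decidable (Spec_get_family_status_from_resolution_py resolution family_id out) := by unfold Spec_get_family_status_from_resolution_py; infer_instance

-- ===== CLAIM (what is proved, stated in full; the proofs are below) =====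
def Claim_equal_get_family_status_from_resolution_py : Prop := ∀ (resolution : List (String × List (List (String × String)))) (family_id : String), Dom_get_family_status_from_resolution_py resolution family_id → Spec_get_family_status_from_resolution_py resolution family_id (get_family_status_from_resolution_py resolution family_id)

-- ===== LEMMAS AND PROOFS =====

-- predicates of A's scans
def pvMatch (family_id : String) (s : List (String × String)) : Bool :=
  PySem.Dict.get? (PySem.Dict.mk s) "family" == some family_id
def pvElig (s : List (String × String)) : Bool :=
  PySem.Dict.get? (PySem.Dict.mk s) "eligibility_status" == some "ELIGIBLE"
def pvCond (s : List (String × String)) : Bool :=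
  PySem.Dict.get? (PySem.Dict.mk s) "eligibility_status" == some "CONDITIONAL"

-- rank contributed by one strategy in B's loop
def pvG (family_id : String) (s : List (String × String)) : Nat :=
  if pvMatch family_id s then (if pvElig s then 3 else if pvCond s then 2 else 1) else 0

-- B's loop body, abstracted
def pvStep (family_id : String) (rank : Nat) (s : List (String × String)) : Nat :=
  if PySem.Dict.get? (PySem.Dict.mk s) "family" == some family_id then
    let st := PySem.Dict.get? (PySem.Dict.mk s) "eligibility_status"
    let r : Nat := if st == some "ELIGIBLE" then 3 else if st == some "CONDITIONAL" then 2 else 1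
    if r > rank then r else rank
  else rank

lemma pvStep_eq_max (family_id : String) (r : Nat) (s : List (String × String)) :
    pvStep family_id r s = max r (pvG family_id s) := by
  simp only [pvStep, pvG, pvMatch, pvElig, pvCond]
  split_ifs <;> omega

-- the final rank of B's fold, characterised by A's three scans
lemma pv_foldl_char (family_id : String) (l : List (List (String × String))) :
    l.foldl (pvStep family_id) 0 =
      (if (l.filter (pvMatch family_id)).any pvElig then 3
       else if (l.filter (pvMatch family_id)).any pvCond then 2
       else if l.filter (pvMatch family_id) = [] then 0 else 1) := by
  have gen : ∀ (l : List (List (String × String))) (r : Nat),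
      l.foldl (pvStep family_id) r =
        max r (if (l.filter (pvMatch family_id)).any pvElig then 3
          else if (l.filter (pvMatch family_id)).any pvCond then 2
          else if l.filter (pvMatch family_id) = [] then 0 else 1) := by
    intro l
    induction l with
    | nil => intro r; simp
    | cons s l ih =>
      intro r
      rw [List.foldl_cons, pvStep_eq_max, ih, List.filter_cons]
      by_cases hm : pvMatch family_id s <;>
        by_cases hE : pvElig s <;> by_cases hC : pvCond s <;>
        simp only [pvG, hm, hE, hC, if_true, if_false, List.any_cons, Bool.true_or,
          Bool.false_or, List.cons_ne_nil, Bool.false_eq_true] <;>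
        split_ifs <;> omega
  rw [gen l 0]; split_ifs <;> omega

-- ===== VERDICT (by name: the statement is the Claim_ definition above) =====
theorem get_family_status_from_resolution_py_spec : Claim_equal_get_family_status_from_resolution_py := by
  intro resolution family_id _
  unfold Spec_get_family_status_from_resolution_py
  unfold get_family_status_from_resolution_py get_family_status_from_resolution_py_alt
  simp only [show (fun (rank : Nat) (s : List (String × String)) =>
      if PySem.Dict.get? (PySem.Dict.mk s) "family" == some family_id then
        let st := PySem.Dict.get? (PySem.Dict.mk s) "eligibility_status"
        let r : Nat := if st == some "ELIGIBLE" then 3 else if st == some "CONDITIONAL" then 2 else 1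
        if r > rank then r else rank
      else rank) = pvStep family_id from rfl]
  rw [pv_foldl_char family_id]
  simp only [show (fun s => PySem.Dict.get? (PySem.Dict.mk s) "family" == some family_id) = pvMatch family_id from rfl,
    show (fun s => PySem.Dict.get? (PySem.Dict.mk s) "eligibility_status" == some "ELIGIBLE") = pvElig from rfl,
    show (fun s => PySem.Dict.get? (PySem.Dict.mk s) "eligibility_status" == some "CONDITIONAL") = pvCond from rfl]
  set fl := (PySem.Dict.getD (PySem.Dict.mk resolution) "strategies" []).filter (pvMatch family_id)
  by_cases hnil : fl = [] <;> by_cases hE : fl.any pvElig <;> by_cases hC : fl.any pvCond <;>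
    simp [hnil, hE, hC]
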